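-- pv_equiv track=rewrite | github.com/colejd/AdventOfCode2018 | day-5/improved/day5part2-improved.py | do_pass
-- ===== SOURCE A (Python) =====
-- def do_pass(line, deleted_polymer):
--     stack = []
--     for char in line:
--         if char == deleted_polymer or char == deleted_polymer.upper():
--             continue
--
--         peek = stack[-1] if stack else None
--         if peek:
--             matching = char.lower() if char.isupper() else char.upper()
--             if peek == matching:
--                 stack.pop()
--                 continue
--         stack.append(char)
--
--     return len(stack)
-- ===== SOURCE B (Python) =====
-- def do_pass(line, deleted_polymer):
--     dp_up = deleted_polymer.upper()
--     units = [c for c in line if c != deleted_polymer and c != dp_up]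
--
--     def toggle(c):
--         return c.lower() if c.isupper() else c.upper()
--
--     while True:
--         out = []
--         i = 0
--         n = len(units)
--         while i < n:
--             if i + 1 < n and units[i + 1] == toggle(units[i]):
--                 i += 2
--             else:
--                 out.append(units[i])
--                 i += 1
--         if len(out) == len(units):
--             break
--         units = out
--     return len(units)
-- ===== Notes on version B (the rewrite author's own statement) =====
-- stated objective: alternative
-- what changed: A's single left-to-right pass with a stack is replaced by first filtering out the deleted unit type (computing deleted_polymer.upper() once, where A recomputes it for every character) and then repeatedly scanning the sequence, deleting every adjacent reacting pair, until a pass removes nothing (a rewrite-to-normal-form fixed-point strategy).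
import Mathlib
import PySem

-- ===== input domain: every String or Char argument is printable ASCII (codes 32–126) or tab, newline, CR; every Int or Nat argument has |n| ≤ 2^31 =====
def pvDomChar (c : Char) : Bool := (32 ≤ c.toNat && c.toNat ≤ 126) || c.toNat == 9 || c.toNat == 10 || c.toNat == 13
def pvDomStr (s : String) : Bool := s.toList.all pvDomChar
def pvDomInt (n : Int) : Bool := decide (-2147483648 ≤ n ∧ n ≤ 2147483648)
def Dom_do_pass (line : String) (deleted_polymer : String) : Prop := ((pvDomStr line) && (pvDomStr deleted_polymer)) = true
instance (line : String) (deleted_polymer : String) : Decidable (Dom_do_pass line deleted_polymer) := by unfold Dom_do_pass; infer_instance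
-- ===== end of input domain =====

-- B replaces A's single-pass stack reduction by a filter followed by a repeated-scan
-- fixed-point reduction (delete adjacent reacting pairs until a pass removes nothing);
-- objective: alternative (a genuinely different nested-pass strategy; a timing run
-- measured B faster, mainly because A recomputes deleted_polymer.upper() per character).

-- ===== PORT A =====
-- literal transliteration of A: one left-to-right pass with a stack
-- (Python's `char == deleted_polymer` compares a 1-char string with the whole string,
--  ported as [char] = deleted_polymer.toList; `if peek:` is true iff the stack is
--  nonempty, since a 1-char string is always truthy).
def do_pass (line : String) (deleted_polymer : String) : Int :=
  let stack := line.toList.foldl (fun stack char =>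
    if [char] = deleted_polymer.toList ∨ [char] = (PySem.Str.upper deleted_polymer).toList then
      stack
    else
      match stack with
      | peek :: rest =>
          let matching := if PySem.Chars.isupper char then PySem.Chars.lowerChar char
                          else PySem.Chars.upperChar char
          if peek = matching then rest else char :: stack
      | [] => char :: stack) []
  (stack.length : Int)

-- ===== PORT B =====
-- Source B's `toggle`
def pvToggle (c : Char) : Char :=
  if PySem.Chars.isupper c then PySem.Chars.lowerChar c else PySem.Chars.upperChar c

-- one scan of Source B's inner `while i < n` loop: delete each adjacent reacting pair
def pvScanOnce : List Char → List Char
  | a :: b :: t => if b = pvToggle a then pvScanOnce t else a :: pvScanOnce (b :: t)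
  | l => l

-- needed by pvFix's termination (Source B's outer loop stops when a pass deletes nothing)
theorem pvScanOnce_length_le (l : List Char) : (pvScanOnce l).length ≤ l.length := by
  induction l using pvScanOnce.induct with
  | case1 a t ih =>
    rw [pvScanOnce, if_pos rfl]
    simp only [List.length_cons]
    omega
  | case2 a b t h ih =>
    rw [pvScanOnce, if_neg h]
    simp only [List.length_cons] at ih ⊢
    omega
  | case3 l h =>
    match l, h with
    | [], _ => exact Nat.le_refl _
    | [a], _ => exact Nat.le_refl _
    | a :: b :: t, h => exact absurd rfl (h a b t)

-- Source B's outer `while True` loop: repeat the scan until its length is unchanged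
def pvFix (s : List Char) : List Char :=
  if (pvScanOnce s).length = s.length then s else pvFix (pvScanOnce s)
termination_by s.length
decreasing_by
  have := pvScanOnce_length_le s
  omega

def do_pass_alt (line : String) (deleted_polymer : String) : Int :=
  let units := line.toList.filter (fun c =>
    !([c] = deleted_polymer.toList : Bool) && !([c] = (PySem.Str.upper deleted_polymer).toList : Bool))
  ((pvFix units).length : Int)

-- ===== PRECONDITION & SPEC =====
def Spec_do_pass (line : String) (deleted_polymer : String) (out : Int) : Prop := out = do_pass_alt line deleted_polymer
instance (line : String) (deleted_polymer : String) (out : Int) : Decidable (Spec_do_pass line deleted_polymer out) := by unfold Spec_do_pass; infer_instance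

-- ===== CLAIM (what is proved, stated in full; the proofs are below) =====
def Claim_equal_do_pass : Prop := ∀ (line : String) (deleted_polymer : String), Dom_do_pass line deleted_polymer → Spec_do_pass line deleted_polymer (do_pass line deleted_polymer)

-- ===== LEMMAS AND PROOFS =====

-- A's stack step, named for the proofs (A's fold body after the skip test)
def pvStep (stack : List Char) (c : Char) : List Char :=
  match stack with
  | peek :: rest => if peek = pvToggle c then rest else c :: stack
  | [] => [c]

-- "reduced": no adjacent reacting pair
def pvRed (l : List Char) : Prop := l.IsChain (fun a b => b ≠ pvToggle a)

theorem pvIsupper_iff (c : Char) : PySem.Chars.isupper c = true ↔ 65 ≤ c.toNat ∧ c.toNat ≤ 90 := by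
  simp only [PySem.Chars.isupper, Bool.and_eq_true, decide_eq_true_eq, Char.le_def,
    UInt32.le_iff_toNat_le, Char.toNat_val]
  constructor <;> intro h <;> exact ⟨by exact_mod_cast h.1, by exact_mod_cast h.2⟩

theorem pvIslower_iff (c : Char) : PySem.Chars.islower c = true ↔ 97 ≤ c.toNat ∧ c.toNat ≤ 122 := by
  simp only [PySem.Chars.islower, Bool.and_eq_true, decide_eq_true_eq, Char.le_def,
    UInt32.le_iff_toNat_le, Char.toNat_val]
  constructor <;> intro h <;> exact ⟨by exact_mod_cast h.1, by exact_mod_cast h.2⟩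

theorem pvToNat_ofNat (n : Nat) (h : n < 55296) : (Char.ofNat n).toNat = n := by
  have hv : n.isValidChar := Or.inl h
  simp only [Char.ofNat, hv, dif_pos]
  rfl

theorem pvOfNat_toNat (c : Char) : Char.ofNat c.toNat = c := by
  have hv : c.toNat.isValidChar := c.valid
  simp only [Char.ofNat, hv, dif_pos]
  apply Char.ext
  rfl

theorem pvToggle_toggle (c : Char) : pvToggle (pvToggle c) = c := by
  by_cases hu : PySem.Chars.isupper c = true
  · have hr := (pvIsupper_iff c).mp hu
    have hl : PySem.Chars.lowerChar c = Char.ofNat (c.toNat + 32) := by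
      simp [PySem.Chars.lowerChar, hu]
    have ht : (Char.ofNat (c.toNat + 32)).toNat = c.toNat + 32 := pvToNat_ofNat _ (by omega)
    have hu2 : PySem.Chars.isupper (Char.ofNat (c.toNat + 32)) = false := by
      rw [← Bool.not_eq_true, pvIsupper_iff, ht]; omega
    have hl2 : PySem.Chars.islower (Char.ofNat (c.toNat + 32)) = true := by
      rw [pvIslower_iff, ht]; omega
    simp only [pvToggle, hu, if_pos, hl, hu2, Bool.false_eq_true, if_false,
      PySem.Chars.upperChar, hl2, if_pos, ht]
    simp [pvOfNat_toNat c]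
  · by_cases hlo : PySem.Chars.islower c = true
    · have hr := (pvIslower_iff c).mp hlo
      have hup : PySem.Chars.upperChar c = Char.ofNat (c.toNat - 32) := by
        simp [PySem.Chars.upperChar, hlo]
      have ht : (Char.ofNat (c.toNat - 32)).toNat = c.toNat - 32 := pvToNat_ofNat _ (by omega)
      have hu2 : PySem.Chars.isupper (Char.ofNat (c.toNat - 32)) = true := by
        rw [pvIsupper_iff, ht]; omega
      have hl2 : PySem.Chars.lowerChar (Char.ofNat (c.toNat - 32)) = Char.ofNat (c.toNat - 32 + 32) := by
        simp [PySem.Chars.lowerChar, hu2, ht]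
      simp only [pvToggle, hu, Bool.false_eq_true, if_false, hup, hu2, if_pos, hl2]
      have : c.toNat - 32 + 32 = c.toNat := by omega
      rw [this, pvOfNat_toNat]
    · have hup : PySem.Chars.upperChar c = c := by
        simp [PySem.Chars.upperChar, hlo]
      simp [pvToggle, hu, hup]

-- involution read as a symmetry of the reaction relation
theorem pvToggle_symm {a b : Char} : a = pvToggle b ↔ b = pvToggle a := by
  constructor <;> intro h <;> rw [h, pvToggle_toggle]

theorem pvStep_red {s : List Char} (h : pvRed s) (c : Char) : pvRed (pvStep s c) := by
  cases s with
  | nil => simp [pvStep, pvRed]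
  | cons p r =>
    by_cases hp : p = pvToggle c
    · simpa only [pvStep, if_pos hp] using h.tail
    · simp only [pvStep, if_neg hp]
      exact List.isChain_cons_cons.mpr ⟨hp, h⟩

theorem pvStep_cancel {s : List Char} (h : pvRed s) (a : Char) :
    pvStep (pvStep s a) (pvToggle a) = s := by
  cases s with
  | nil => simp [pvStep, pvToggle_toggle]
  | cons p r =>
    by_cases hp : p = pvToggle a
    · simp only [pvStep, if_pos hp]
      cases r with
      | nil => simp [hp]
      | cons q r' =>
        have hq : q ≠ pvToggle p := (List.isChain_cons_cons.mp h).1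
        have : ¬ q = pvToggle (pvToggle a) := by rw [← hp]; exact hq
        simp [this, hp]
    · simp only [pvStep, if_neg hp]
      have : a = pvToggle (pvToggle a) := (pvToggle_toggle a).symm
      simp [← this]

-- one scan pass does not change the final stack
theorem pvFoldl_scanOnce (l : List Char) :
    ∀ s : List Char, pvRed s → (pvScanOnce l).foldl pvStep s = l.foldl pvStep s := by
  induction l using pvScanOnce.induct with
  | case1 a t ih =>
    intro s hs
    have h2 : (a :: pvToggle a :: t).foldl pvStep s = t.foldl pvStep s := by
      simp only [List.foldl_cons]
      rw [pvStep_cancel hs]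
    rw [h2, pvScanOnce, if_pos rfl, ih s hs]
  | case2 a b t h ih =>
    intro s hs
    rw [pvScanOnce, if_neg h]
    simp only [List.foldl_cons]
    exact ih (pvStep s a) (pvStep_red hs a)
  | case3 l h =>
    intro s hs
    match l, h with
    | [], _ => rfl
    | [a], _ => rfl
    | a :: b :: t, h => exact absurd rfl (h a b t)

-- a scan that deletes nothing certifies reducedness
theorem pvScanOnce_stable_red (l : List Char) :
    (pvScanOnce l).length = l.length → pvRed l := by
  induction l using pvScanOnce.induct with
  | case1 a t ih =>
    intro hl
    exfalso
    rw [pvScanOnce, if_pos rfl] at hl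
    have := pvScanOnce_length_le t
    simp at hl; omega
  | case2 a b t h ih =>
    intro hl
    rw [pvScanOnce, if_neg h] at hl
    simp only [List.length_cons, Nat.add_right_cancel_iff] at hl
    exact List.isChain_cons_cons.mpr ⟨h, ih hl⟩
  | case3 l h =>
    intro _
    match l, h with
    | [], _ => simp [pvRed]
    | [a], _ => simp [pvRed]
    | a :: b :: t, h => exact absurd rfl (h a b t)

theorem pvFix_foldl (s : List Char) : (pvFix s).foldl pvStep [] = s.foldl pvStep [] := by
  induction s using pvFix.induct with
  | case1 s h => rw [pvFix, if_pos h]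
  | case2 s h ih =>
    rw [pvFix, if_neg h]
    rw [ih, pvFoldl_scanOnce s [] (by simp [pvRed])]

theorem pvFix_red (s : List Char) : pvRed (pvFix s) := by
  induction s using pvFix.induct with
  | case1 s h => rw [pvFix, if_pos h]; exact pvScanOnce_stable_red s h
  | case2 s h ih => rw [pvFix, if_neg h]; exact ih

-- pushing a reduced word onto the stack just reverses it
theorem pvFoldl_of_red (r : List Char) :
    ∀ t : List Char, pvRed (r.reverse ++ t) → r.foldl pvStep t = r.reverse ++ t := by
  induction r with
  | nil => intro t _; simp
  | cons a r' ih =>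
    intro t h
    have hrw : (a :: r').reverse ++ t = r'.reverse ++ (a :: t) := by simp
    rw [hrw] at h
    have htl : pvRed (a :: t) := (List.isChain_append.mp h).2.1
    have hstep : pvStep t a = a :: t := by
      cases t with
      | nil => simp [pvStep]
      | cons p u =>
        have hp : p ≠ pvToggle a := (List.isChain_cons_cons.mp htl).1
        simp [pvStep, hp]
    simp only [List.foldl_cons, hstep]
    rw [ih (a :: t) h, hrw]

theorem pvRed_reverse {l : List Char} (h : pvRed l) : pvRed l.reverse := by
  unfold pvRed at *
  rw [List.isChain_reverse]
  exact h.imp (fun {a b} hab hba => hab (pvToggle_symm.mp hba))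

-- A's loop is the pvStep-fold over the filtered units
theorem pvDoPass_eq_foldl (line : String) (deleted_polymer : String) :
    do_pass line deleted_polymer =
      (((line.toList.filter (fun c =>
        !([c] = deleted_polymer.toList : Bool) && !([c] = (PySem.Str.upper deleted_polymer).toList : Bool))).foldl pvStep []).length : Int) := by
  show (((line.toList.foldl (fun stack char =>
    if [char] = deleted_polymer.toList ∨ [char] = (PySem.Str.upper deleted_polymer).toList then
      stack
    else
      match stack with
      | peek :: rest =>
          let matching := if PySem.Chars.isupper char then PySem.Chars.lowerChar char
                          else PySem.Chars.upperChar char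
          if peek = matching then rest else char :: stack
      | [] => char :: stack) []).length : Int)) = _
  rw [List.foldl_filter]
  have : (fun (stack : List Char) (char : Char) =>
      if [char] = deleted_polymer.toList ∨ [char] = (PySem.Str.upper deleted_polymer).toList then
        stack
      else
        match stack with
        | peek :: rest =>
            let matching := if PySem.Chars.isupper char then PySem.Chars.lowerChar char
                            else PySem.Chars.upperChar char
            if peek = matching then rest else char :: stack
        | [] => char :: stack) =
      (fun (x : List Char) (c : Char) =>
      if (!([c] = deleted_polymer.toList : Bool) && !([c] = (PySem.Str.upper deleted_polymer).toList : Bool)) = true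
      then pvStep x c else x) := by
    funext s c
    by_cases h1 : [c] = deleted_polymer.toList <;>
      by_cases h2 : [c] = (PySem.Str.upper deleted_polymer).toList <;>
      simp [h1, h2, pvStep, pvToggle]; (cases s; rfl; rfl)
  rw [this]

-- ===== VERDICT (by name: the statement is the Claim_ definition above) =====
theorem do_pass_spec : Claim_equal_do_pass := by
  intro line deleted_polymer _
  unfold Spec_do_pass do_pass_alt
  rw [pvDoPass_eq_foldl]
  congr 1
  have h1 := pvFix_foldl (line.toList.filter (fun c =>
    !([c] = deleted_polymer.toList : Bool) && !([c] = (PySem.Str.upper deleted_polymer).toList : Bool)))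
  set u := line.toList.filter (fun c =>
    !([c] = deleted_polymer.toList : Bool) && !([c] = (PySem.Str.upper deleted_polymer).toList : Bool)) with hu
  have h2 : (pvFix u).foldl pvStep [] = (pvFix u).reverse := by
    have h3 := pvFoldl_of_red (pvFix u) []
    simpa using h3 (by simpa using pvRed_reverse (pvFix_red u))
  rw [← h1, h2, List.length_reverse]
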